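-- pv_equiv track=rewrite | github.com/ubermenchh/anki-cli | anki_cli/cli/commands/deck.py | _deck_chain
-- ===== SOURCE A (Python) =====
-- def _deck_chain(name: str) -> list[str]:
--     raw = name.strip()
--     if not raw:
--         raise ValueError("Deck name cannot be empty.")
--
--     parts = [part.strip() for part in raw.split("::")]
--     if any(not part for part in parts):
--         raise ValueError("Deck hierarchy has empty segment(s). Use names like A::B::C.")
--
--     chain: list[str] = []
--     for idx in range(1, len(parts) + 1):
--         chain.append("::".join(parts[:idx]))
--     return chain
-- ===== SOURCE B (Python) =====
-- def _deck_chain(name: str) -> list[str]: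
--     raw = name.strip()
--     if not raw:
--         raise ValueError("Deck name cannot be empty.")
--
--     parts = [part.strip() for part in raw.split("::")]
--     if any(not part for part in parts):
--         raise ValueError("Deck hierarchy has empty segment(s). Use names like A::B::C.")
--
--     current = parts[0]
--     chain = [current]
--     for part in parts[1:]:
--         current = current + "::" + part
--         chain.append(current)
--     return chain
-- ===== Notes on version B (the rewrite author's own statement) =====
-- stated objective: alternative
-- what changed: Replaced the per-index slice-and-join loop (re-joining every prefix from scratch) with a single left-fold that carries the running prefix string and appends one segment per step.
import Mathlib
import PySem

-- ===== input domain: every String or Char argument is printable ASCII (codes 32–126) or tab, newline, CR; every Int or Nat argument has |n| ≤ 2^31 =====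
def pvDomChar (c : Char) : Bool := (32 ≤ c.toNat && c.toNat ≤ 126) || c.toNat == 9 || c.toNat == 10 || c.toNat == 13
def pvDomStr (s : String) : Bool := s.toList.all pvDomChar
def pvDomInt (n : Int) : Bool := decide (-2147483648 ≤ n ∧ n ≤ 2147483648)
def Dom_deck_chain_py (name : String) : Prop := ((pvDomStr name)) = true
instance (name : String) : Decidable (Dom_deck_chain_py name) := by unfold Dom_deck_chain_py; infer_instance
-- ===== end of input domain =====

-- B replaces A's slice-and-join loop by a single left-fold carrying the running prefix
-- (each step one concatenation instead of re-joining each prefix from scratch); objective: alternative decomposition.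

-- ===== PORT A =====
-- A raises ValueError on a blank name and on empty segments; those inputs are outside
-- Pre_ below and the port returns [] there.
def deck_chain_py (name : String) : List String :=
  let raw := PySem.Str.strip name
  if raw = "" then []
  else
    let parts := ((PySem.Str.split? raw "::").getD []).map PySem.Str.strip
    if parts.any (fun part => part = "") then []
    else
      (PySem.List.pyRange 1 ((parts.length : Int) + 1) 1).foldl
        (fun chain idx => chain ++ [PySem.Str.join "::" (PySem.List.slice parts none (some idx))]) []

-- ===== PORT B =====
def deck_chain_py_alt (name : String) : List String :=
  let raw := PySem.Str.strip name
  if raw = "" then []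
  else
    let parts := ((PySem.Str.split? raw "::").getD []).map PySem.Str.strip
    if parts.any (fun part => part = "") then []
    else
      match parts with
      | [] => []
      | p :: ps =>
        (ps.foldl (fun (st : List String × String) part =>
            let cur := st.2 ++ "::" ++ part
            (st.1 ++ [cur], cur)) ([p], p)).1

-- ===== PRECONDITION & SPEC =====
-- Pre_ excludes exactly the inputs on which A raises ValueError: a name that strips to
-- empty, or one with an empty (after strip) '::'-segment.
def Pre_deck_chain_py (name : String) : Prop :=
  PySem.Str.strip name ≠ "" ∧
  ∀ part ∈ ((PySem.Str.split? (PySem.Str.strip name) "::").getD []).map PySem.Str.strip,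
    part ≠ ""
instance (name : String) : Decidable (Pre_deck_chain_py name) := by
  unfold Pre_deck_chain_py; infer_instance
def pvWitness_deck_chain_py : String := " A :: B::C "

def Spec_deck_chain_py (name : String) (out : List String) : Prop := out = deck_chain_py_alt name
instance (name : String) (out : List String) : Decidable (Spec_deck_chain_py name out) := by unfold Spec_deck_chain_py; infer_instance

-- ===== CLAIM (what is proved, stated in full; the proofs are below) =====
def Claim_equal_deck_chain_py : Prop := ∀ (name : String), Dom_deck_chain_py name → Pre_deck_chain_py name → Spec_deck_chain_py name (deck_chain_py name)

-- ===== LEMMAS AND PROOFS =====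

-- the sequence of running prefixes B computes, as a recursive function (proof helper)
def scanPrefix (c : String) : List String → List String
  | [] => []
  | q :: qs => (c ++ "::" ++ q) :: scanPrefix (c ++ "::" ++ q) qs

lemma join_single (a : String) : PySem.Str.join "::" [a] = a := by
  rw [← String.toList_inj]
  simp [PySem.Str.toList_join, PySem.Chars.join_singleton]

lemma join_cons (a b : String) (rest : List String) :
    PySem.Str.join "::" (a :: b :: rest) = a ++ "::" ++ PySem.Str.join "::" (b :: rest) := by
  rw [← String.toList_inj]
  simp [PySem.Str.toList_join, PySem.Chars.join_cons_cons, String.toList_append]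

-- join "::" absorbs an already-joined head
lemma join_glue (a b : String) (rest : List String) :
    PySem.Str.join "::" ((a ++ "::" ++ b) :: rest) = PySem.Str.join "::" (a :: b :: rest) := by
  cases rest with
  | nil => rw [join_single, join_cons, join_single]
  | cons r rs =>
      rw [join_cons, join_cons a b (r :: rs), join_cons b r rs]
      simp [String.append_assoc]

-- B's fold, from accumulated output acc and running prefix c, appends scanPrefix c ps
lemma alt_fold_eq (ps : List String) (acc : List String) (c : String) :
    (ps.foldl (fun (st : List String × String) part =>
        (st.1 ++ [st.2 ++ "::" ++ part], st.2 ++ "::" ++ part)) (acc, c)).1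
    = acc ++ scanPrefix c ps := by
  induction ps generalizing acc c with
  | nil => simp [scanPrefix]
  | cons q qs ih =>
      simp only [List.foldl_cons, scanPrefix]
      rw [ih]
      simp

-- A's per-index joins of growing prefixes are exactly the running-prefix scan
lemma scan_eq (c : String) (ps : List String) :
    (List.range ps.length).map (fun k => PySem.Str.join "::" (c :: ps.take (k + 1)))
      = scanPrefix c ps := by
  induction ps generalizing c with
  | nil => simp [scanPrefix]
  | cons q qs ih =>
      simp only [List.length_cons, List.range_succ_eq_map, List.map_cons, List.map_map, scanPrefix]
      congr 1
      · rw [List.take_succ_cons, List.take_zero, join_cons, join_single]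
      · rw [← ih (c ++ "::" ++ q)]
        apply List.map_congr_left
        intro k _
        simp only [Function.comp, Nat.succ_eq_add_one, List.take_succ_cons]
        rw [join_glue]

lemma range_map_one_add {α : Type} (n : Nat) (f : Int → α) :
    (PySem.List.pyRange 1 ((n : Int) + 1) 1).map f
      = (List.range n).map (fun (k : Nat) => f ((k : Int) + 1)) := by
  rw [PySem.List.pyRange_one]
  have h : ((n : Int) + 1 - 1).toNat = n := by omega
  rw [h, List.map_map]
  apply List.map_congr_left
  intro k _
  simp only [Function.comp]
  rw [add_comm]

-- the core equality of the two chain-building loops, for any nonempty parts list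
lemma chains_eq (p : String) (ps : List String) :
    (PySem.List.pyRange 1 (((p :: ps).length : Int) + 1) 1).foldl
        (fun chain idx => chain ++ [PySem.Str.join "::" (PySem.List.slice (p :: ps) none (some idx))]) []
    = ((ps.foldl (fun (st : List String × String) part =>
          (st.1 ++ [st.2 ++ "::" ++ part], st.2 ++ "::" ++ part)) ([p], p)).1) := by
  rw [PySem.List.foldl_append_singleton_eq_map, List.nil_append, alt_fold_eq]
  rw [range_map_one_add ((p :: ps).length)
      (fun idx => PySem.Str.join "::" (PySem.List.slice (p :: ps) none (some idx)))]
  have hsl : ∀ k : Nat, PySem.List.slice (p :: ps) none (some ((k : Int) + 1)) = p :: ps.take k := by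
    intro k
    have h1 : ((k : Int) + 1) = (((k + 1 : Nat) : Int)) := by push_cast; ring
    rw [h1, PySem.List.slice_to_natCast, List.take_succ_cons]
  simp only [hsl]
  simp only [List.length_cons, List.range_succ_eq_map, List.map_cons, List.map_map]
  congr 1
  · simpa using join_single p
  · rw [← scan_eq p ps]
    apply List.map_congr_left
    intro k _
    simp [Function.comp]

-- ===== VERDICT (by name: the statement is the Claim_ definition above) =====
set_option maxHeartbeats 1000000 in
theorem deck_chain_py_spec : Claim_equal_deck_chain_py := by
  intro name _ hpre
  obtain ⟨h1, h2⟩ := hpre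
  have h1' : (PySem.Str.strip name = "") = False := eq_false h1
  have hany : (((PySem.Str.split? (PySem.Str.strip name) "::").getD []).map PySem.Str.strip).any
      (fun part => part = "") = false := by
    simp only [List.any_eq_false, decide_eq_true_eq]
    intro x hx
    exact h2 x hx
  unfold Spec_deck_chain_py deck_chain_py deck_chain_py_alt
  simp only [h1', if_false, hany, Bool.false_eq_true]
  cases ((PySem.Str.split? (PySem.Str.strip name) "::").getD []).map PySem.Str.strip with
  | nil => simp
  | cons p ps => exact chains_eq p ps
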